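-- pv_equiv track=rewrite | github.com/Oo1ongCha/Potstickers-Python | Introduction to Computer/7/7-7.py | reverse_number
-- ===== SOURCE A (Python) =====
-- def reverse_number(n) :
--     L = []
--     while n > 0 :
--         L.append(n % 10)
--         n = n // 10
--     s = 0
--     for i in range(len(L)) :
--         s = s + L[i]*(10**(len(L)-i-1))
--     return s
-- ===== SOURCE B (Python) =====
-- def reverse_number(n):
--     # Horner's method: single pass, running accumulator, no intermediate list.
--     s = 0
--     while n > 0:
--         s = s * 10 + n % 10
--         n = n // 10
--     return s
-- ===== Notes on version B (the rewrite author's own statement) =====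
-- stated objective: simpler
-- what changed: Replaces A's two-phase approach (collect digits into a list, then sum each digit times a positional power of ten) with a single Horner-style while-loop keeping only a running accumulator (multiply accumulator by ten, add the last digit).
import Mathlib
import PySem

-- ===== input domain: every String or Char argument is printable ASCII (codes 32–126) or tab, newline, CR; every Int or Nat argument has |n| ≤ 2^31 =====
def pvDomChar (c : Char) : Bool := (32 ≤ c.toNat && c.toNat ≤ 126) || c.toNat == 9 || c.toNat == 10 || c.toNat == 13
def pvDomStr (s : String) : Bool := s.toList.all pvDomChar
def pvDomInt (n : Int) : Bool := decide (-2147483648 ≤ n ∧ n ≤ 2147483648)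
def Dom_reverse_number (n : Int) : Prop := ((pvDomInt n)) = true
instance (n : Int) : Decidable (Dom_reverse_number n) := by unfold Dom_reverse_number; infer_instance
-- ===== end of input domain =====

-- B replaces A's two-phase digit-list + positional-power summation with a single Horner-style loop (simpler).


-- ===== PORT A =====
-- the 'while n > 0: L.append(n % 10); n = n // 10' loop of A
def pvDigitsA (n : Int) : List Int :=
  if _h : n > 0 then PySem.Int.mod n 10 :: pvDigitsA (PySem.Int.floordiv n 10) else []
termination_by n.toNat
decreasing_by
  rw [PySem.Int.floordiv_eq_ediv_of_pos (by omega : (0:Int) < 10)]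
  omega

-- the second phase: 'for i in range(len(L)): s = s + L[i]*(10**(len(L)-i-1))'
def pvSumA (L : List Int) : Int :=
  (PySem.List.pyRange 0 (L.length : Int) 1).foldl
    (fun s i => s + PySem.List.pyGetD L i 0 * 10 ^ ((L.length : Int) - i - 1).toNat) 0

def reverse_number (n : Int) : Int := pvSumA (pvDigitsA n)

-- ===== PORT B =====
-- the 'while n > 0: s = s*10 + n%10; n = n//10' loop of B
def pvHornerB (n s : Int) : Int :=
  if _h : n > 0 then pvHornerB (PySem.Int.floordiv n 10) (s * 10 + PySem.Int.mod n 10) else s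
termination_by n.toNat
decreasing_by
  rw [PySem.Int.floordiv_eq_ediv_of_pos (by omega : (0:Int) < 10)]
  omega

def reverse_number_alt (n : Int) : Int := pvHornerB n 0

-- ===== PRECONDITION & SPEC =====
def Spec_reverse_number (n : Int) (out : Int) : Prop := out = reverse_number_alt n
instance (n : Int) (out : Int) : Decidable (Spec_reverse_number n out) := by unfold Spec_reverse_number; infer_instance

-- ===== CLAIM (what is proved, stated in full; the proofs are below) =====
def Claim_equal_reverse_number : Prop := ∀ (n : Int), Dom_reverse_number n → Spec_reverse_number n (reverse_number n)

-- ===== LEMMAS AND PROOFS =====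

-- B's loop is a left fold of the Horner step over A's digit list
theorem horner_eq_foldl (n s : Int) :
    pvHornerB n s = (pvDigitsA n).foldl (fun a d => a * 10 + d) s := by
  fun_induction pvHornerB n s with
  | case1 n s h ih => rw [pvDigitsA, dif_pos h]; simpa using ih
  | case2 n s h => rw [pvDigitsA, dif_neg h]; rfl

-- Horner fold with seed s = s·10^len + the positional-weight sum A computes
theorem foldl_horner_eq_sum (L : List Int) (s : Int) :
    L.foldl (fun a d => a * 10 + d) s
      = s * 10 ^ L.length
        + ((List.range L.length).map (fun k => L.getD k 0 * 10 ^ (L.length - 1 - k))).sum := by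
  induction L generalizing s with
  | nil => simp
  | cons d L ih =>
    simp only [List.foldl_cons, ih, List.length_cons, List.range_succ_eq_map, List.map_cons,
      List.map_map, List.sum_cons]
    have : ((List.range L.length).map ((fun k => (d :: L).getD k 0 * 10 ^ (L.length + 1 - 1 - k)) ∘ Nat.succ)).sum
        = ((List.range L.length).map (fun k => L.getD k 0 * 10 ^ (L.length - 1 - k))).sum := by
      congr 1
      apply List.map_congr_left
      intro k hk
      simp only [Function.comp, List.getD_cons_succ]
      congr 2
      simp at hk
      omega
    rw [this]
    simp only [List.getD_cons_zero, Nat.add_sub_cancel, Nat.sub_zero]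
    ring

theorem sumA_eq_sum (L : List Int) :
    pvSumA L = ((List.range L.length).map (fun k => L.getD k 0 * 10 ^ (L.length - 1 - k))).sum := by
  unfold pvSumA
  rw [PySem.List.pyRange_one]
  simp only [sub_zero, Int.toNat_natCast, List.foldl_map, zero_add]
  have hcongr := PySem.List.foldl_congr_mem
    (l := List.range L.length) (init := (0 : Int))
    (f := fun (x : Int) (y : Nat) => x + PySem.List.pyGetD L (↑y) 0 * 10 ^ ((↑L.length - ↑y - 1 : Int)).toNat)
    (g := fun (s : Int) (k : Nat) => s + L.getD k 0 * 10 ^ (L.length - 1 - k))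
    (by
      intro acc k hk
      simp only [List.mem_range] at hk
      simp only [PySem.List.pyGetD_natCast]
      have he : ((L.length : Int) - k - 1).toNat = L.length - 1 - k := by omega
      rw [he])
  rw [hcongr]
  rw [PySem.List.foldl_add (g := fun k => L.getD k 0 * 10 ^ (L.length - 1 - k))]
  simp

-- ===== VERDICT (by name: the statement is the Claim_ definition above) =====
theorem reverse_number_spec : Claim_equal_reverse_number := by
  intro n _
  show reverse_number n = reverse_number_alt n
  unfold reverse_number reverse_number_alt
  rw [horner_eq_foldl, foldl_horner_eq_sum, sumA_eq_sum]
  ring
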